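-- pv_equiv track=rewrite | github.com/cbfredster/sortingAlgos-DS | q1.py | compute_winner
-- ===== SOURCE A (Python) =====
-- def compute_winner(history_A, history_B):
--  win = ""
--  headSumA = 0
--  headMaxA = 0
--  for i in history_A:
--   if i == 'H':
--    headSumA = headSumA + 1
--   if i == 'T':
--   	#changing highscore (of consecutive H's') if current HeadSum is greater than HeadMax
--    if headMaxA <= headSumA:
--       headMaxA = headSumA
--       # sets highscore to 0 as consecutive row of H has terminated
--    headSumA = 0
--   if headMaxA < headSumA:
--    headMaxA = headSumA
--     #same iteration for history of B, switched variable names though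
--  headSumB = 0
--  headMaxB = 0
--  for j in history_B:
--   if j == 'H':
--    headSumB = headSumB + 1
--   if j == 'T':
--    if headMaxB <= headSumB:
--       headMaxB = headSumB
--    headSumB = 0
--   if headMaxB < headSumB:
--    headMaxB = headSumB
--  # initialised win variable is given string 'value' to be returned/outputted from the function
--  if headMaxA < headMaxB:
--    win = "B"
--  if headMaxA > headMaxB:
--    win = "A"
--  if headMaxA == headMaxB:
--    win = "D"
--  return(win)
-- ===== SOURCE B (Python) =====
-- def longest_h_run(h):
--     if 'T' not in h:
--         return h.count('H')
--     i = h.index('T')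
--     return max(h[:i].count('H'), longest_h_run(h[i+1:]))
--
--
-- def compute_winner(history_A, history_B):
--     a = longest_h_run(history_A)
--     b = longest_h_run(history_B)
--     if a > b:
--         return "A"
--     if b > a:
--         return "B"
--     return "D"
-- ===== Notes on version B (the rewrite author's own statement) =====
-- stated objective: alternative
-- what changed: Replaces A's character-by-character accumulator loop (running sum and running max with three sequential if-updates) by a recursive decomposition that splits the history at the first 'T' and takes the max of the 'H'-count of each segment.
import Mathlib
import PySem

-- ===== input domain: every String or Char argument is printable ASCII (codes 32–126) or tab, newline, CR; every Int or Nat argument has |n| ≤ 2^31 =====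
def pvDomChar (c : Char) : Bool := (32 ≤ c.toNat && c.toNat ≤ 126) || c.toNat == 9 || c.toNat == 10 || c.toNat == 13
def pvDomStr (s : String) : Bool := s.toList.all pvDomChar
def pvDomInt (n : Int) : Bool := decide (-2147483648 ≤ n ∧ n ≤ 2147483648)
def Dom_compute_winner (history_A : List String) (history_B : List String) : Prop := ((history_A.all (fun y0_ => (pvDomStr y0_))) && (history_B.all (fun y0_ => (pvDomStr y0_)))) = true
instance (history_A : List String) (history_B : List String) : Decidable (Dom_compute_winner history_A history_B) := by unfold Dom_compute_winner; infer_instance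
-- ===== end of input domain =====

-- Port A = the original running-sum/running-max loop; B = a recursive split-at-first-'T' decomposition
-- counting 'H' per segment (alternative decomposition, same return value; no speed claim).


-- ===== PORT A =====
-- one iteration of A's loop on state (headSum, headMax), branches in A's order
def pvLoopA (st : Int × Int) (i : String) : Int × Int :=
  let s := if i = "H" then st.1 + 1 else st.1
  let m := st.2
  let m := if i = "T" then (if m ≤ s then s else m) else m
  let s := if i = "T" then 0 else s
  let m := if m < s then s else m
  (s, m)

def compute_winner (history_A : List String) (history_B : List String) : String :=
  let win := ""
  let stA := history_A.foldl pvLoopA (0, 0)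
  let headMaxA := stA.2
  let stB := history_B.foldl pvLoopA (0, 0)
  let headMaxB := stB.2
  let win := if headMaxA < headMaxB then "B" else win
  let win := if headMaxA > headMaxB then "A" else win
  let win := if headMaxA = headMaxB then "D" else win
  win

-- ===== PORT B =====
-- termination helper for the recursive slice (the tail h[i+1:] is strictly shorter)
theorem pvSliceFromSucc_length_lt (h : List String) (i : Nat)
    (hi : PySem.List.index? h "T" = some i) :
    (PySem.List.slice h (some ((i : Int) + 1)) none).length < h.length := by
  obtain ⟨hk, -, -⟩ := PySem.List.getElem_of_index?_eq_some hi
  have : ((i : Int) + 1) = ((i + 1 : Nat) : Int) := by push_cast; ring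
  rw [this, PySem.List.slice_from_natCast, List.length_drop]
  omega

def longest_h_run (h : List String) : Int :=
  match hidx : PySem.List.index? h "T" with
  | none => (PySem.List.count h "H" : Int)
  | some i =>
      max ((PySem.List.count (PySem.List.slice h none (some (i : Int))) "H" : Int))
          (longest_h_run (PySem.List.slice h (some ((i : Int) + 1)) none))
termination_by h.length
decreasing_by exact pvSliceFromSucc_length_lt h i hidx

def compute_winner_alt (history_A : List String) (history_B : List String) : String :=
  let a := longest_h_run history_A
  let b := longest_h_run history_B
  if a > b then "A"
  else if b > a then "B"
  else "D"

-- ===== PRECONDITION & SPEC =====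
def Spec_compute_winner (history_A : List String) (history_B : List String) (out : String) : Prop := out = compute_winner_alt history_A history_B
instance (history_A : List String) (history_B : List String) (out : String) : Decidable (Spec_compute_winner history_A history_B out) := by unfold Spec_compute_winner; infer_instance

-- ===== CLAIM (what is proved, stated in full; the proofs are below) =====
def Claim_equal_compute_winner : Prop := ∀ (history_A : List String) (history_B : List String), Dom_compute_winner history_A history_B → Spec_compute_winner history_A history_B (compute_winner history_A history_B)

-- ===== LEMMAS AND PROOFS =====

-- abstract "best H-run from a pending run of length s": common reference point for both ports
def pvBest : Int → List String → Int
  | s, [] => s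
  | s, x :: t => if x = "H" then pvBest (s + 1) t else if x = "T" then max s (pvBest 0 t) else pvBest s t

theorem pvLe_best : ∀ (t : List String) (s : Int), s ≤ pvBest s t := by
  intro t
  induction t with
  | nil => intro s; simp [pvBest]
  | cons x t ih =>
      intro s
      by_cases hH : x = "H"
      · simpa [pvBest, hH] using le_trans (by omega) (ih (s + 1))
      · by_cases hT : x = "T"
        · simp [pvBest, hH, hT]
        · simpa [pvBest, hH, hT] using ih s

-- characterisation of A's loop
theorem pvFoldA_char : ∀ (t : List String) (s m : Int), 0 ≤ s → s ≤ m →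
    (t.foldl pvLoopA (s, m)).2 = max m (pvBest s t) := by
  intro t
  induction t with
  | nil => intro s m h0 hsm; simp [pvBest]; omega
  | cons x t ih =>
      intro s m h0 hsm
      by_cases hH : x = "H"
      · have hstep : pvLoopA (s, m) x = (s + 1, max m (s + 1)) := by
          simp [pvLoopA, hH]; omega
        rw [List.foldl_cons, hstep, ih (s + 1) (max m (s + 1)) (by omega) (by omega)]
        have := pvLe_best t (s + 1)
        simp [pvBest, hH]
        omega
      · by_cases hT : x = "T"
        · have hstep : pvLoopA (s, m) x = (0, m) := by
            simp [pvLoopA, hH, hT]; omega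
          rw [List.foldl_cons, hstep, ih 0 m (by omega) (by omega)]
          simp [pvBest, hH, hT]
          omega
        · have hstep : pvLoopA (s, m) x = (s, m) := by
            simp [pvLoopA, hH, hT]; omega
          rw [List.foldl_cons, hstep, ih s m h0 hsm]
          simp [pvBest, hH, hT]

theorem pvBest_no_T : ∀ (t : List String) (s : Int), "T" ∉ t →
    pvBest s t = s + (t.count "H" : Int) := by
  intro t
  induction t with
  | nil => intro s _; simp [pvBest]
  | cons x t ih =>
      intro s hx
      have hT : x ≠ "T" := by intro h; exact hx (by simp [h])
      have hmem : "T" ∉ t := fun h => hx (List.mem_cons_of_mem _ h)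
      by_cases hH : x = "H"
      · rw [show pvBest s (x :: t) = pvBest (s + 1) t by simp [pvBest, hH],
          ih (s + 1) hmem]
        subst hH
        simp
        ring
      · rw [show pvBest s (x :: t) = pvBest s t by simp [pvBest, hH, hT], ih s hmem]
        have : (x :: t).count "H" = t.count "H" := by
          simp [hH]
        rw [this]

theorem pvBest_split : ∀ (pre post : List String) (s : Int), "T" ∉ pre →
    pvBest s (pre ++ "T" :: post) = max (s + (pre.count "H" : Int)) (pvBest 0 post) := by
  intro pre
  induction pre with
  | nil => intro post s _; simp [pvBest]
  | cons x p ih =>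
      intro post s hx
      have hT : x ≠ "T" := by intro h; exact hx (by simp [h])
      have hmem : "T" ∉ p := fun h => hx (List.mem_cons_of_mem _ h)
      by_cases hH : x = "H"
      · rw [show pvBest s ((x :: p) ++ "T" :: post) = pvBest (s + 1) (p ++ "T" :: post) by
            simp [pvBest, hH], ih post (s + 1) hmem]
        subst hH
        simp
        ring_nf
      · rw [show pvBest s ((x :: p) ++ "T" :: post) = pvBest s (p ++ "T" :: post) by
            simp [pvBest, hH, hT], ih post s hmem]
        have : (x :: p).count "H" = p.count "H" := by simp [hH]
        rw [this]

theorem pvLongest_eq_best (h : List String) : longest_h_run h = pvBest 0 h := by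
  induction hlen : h.length using Nat.strong_induction_on generalizing h with
  | _ n ih =>
    subst hlen
    rw [longest_h_run]
    split
    next hidx =>
        have hmem : "T" ∉ h := (PySem.List.index?_eq_none_iff h "T").mp hidx
        simp [pvBest_no_T h 0 hmem]
    next i hidx =>
        obtain ⟨pre, post, hsplit, hlen_pre, hpre⟩ :=
          (PySem.List.index?_eq_some_iff h "T" i).mp hidx
        have hi1 : ((i : Int) + 1) = ((i + 1 : Nat) : Int) := by push_cast; ring
        have hslice1 : PySem.List.slice h none (some (i : Int)) = pre := by
          rw [PySem.List.slice_to_natCast, hsplit, ← hlen_pre]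
          simp
        have hslice2 : PySem.List.slice h (some ((i : Int) + 1)) none = post := by
          rw [hi1, PySem.List.slice_from_natCast, hsplit, ← hlen_pre]
          simp
        have hlt : post.length < h.length := by
          rw [hsplit]; simp; omega
        rw [hslice1, hslice2, ih post.length hlt post rfl, hsplit,
          pvBest_split pre post 0 hpre]
        simp

theorem pvHeadMax_eq (h : List String) : (h.foldl pvLoopA (0, 0)).2 = longest_h_run h := by
  rw [pvFoldA_char h 0 0 le_rfl le_rfl, pvLongest_eq_best]
  have := pvLe_best h 0
  omega

-- ===== VERDICT (by name: the statement is the Claim_ definition above) =====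
theorem compute_winner_spec : Claim_equal_compute_winner := by
  intro hA hB _
  unfold Spec_compute_winner
  show compute_winner hA hB = compute_winner_alt hA hB
  simp only [compute_winner, compute_winner_alt]
  rw [pvHeadMax_eq hA, pvHeadMax_eq hB]
  rcases lt_trichotomy (longest_h_run hA) (longest_h_run hB) with hlt | heq | hgt
  · simp [hlt, not_lt.mpr (le_of_lt hlt), ne_of_lt hlt]
  · simp [heq]
  · simp [hgt, not_lt.mpr (le_of_lt hgt), ne_of_gt hgt, lt_asymm hgt]
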